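-- pv_equiv track=rewrite | github.com/ooSvn/pyxcel- | Morajjabi Dakdareh-Ali-610300104-EvalString(Version2).py | hashh
-- ===== SOURCE A (Python) =====
-- def hashh(string : str) -> int:
--     try:
--         return int(string)
--     except:
--         wholeHash = 0
--
--         for i in string[1:-1]:
--             wholeHash *= 26
--             wholeHash += ord(i) - ord("A")+1
--
--         return wholeHash-1
-- ===== SOURCE B (Python) =====
-- def hashh(string: str) -> int:
--     try:
--         return int(string)
--     except:
--         s = string[1:-1]
--         pows = [1]
--         for _ in range(len(s) - 1):
--             pows.append(pows[-1] * 26)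
--         return sum(p * (ord(c) - 64) for p, c in zip(pows, reversed(s))) - 1
-- ===== Notes on version B (the rewrite author's own statement) =====
-- stated objective: alternative
-- what changed: Replaces A's single-pass Horner multiply-and-add accumulator with two staged passes: first build the base-26 power table [1, 26, 26^2, ...], then zip it with the reversed substring and sum the positional products.
import Mathlib
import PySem

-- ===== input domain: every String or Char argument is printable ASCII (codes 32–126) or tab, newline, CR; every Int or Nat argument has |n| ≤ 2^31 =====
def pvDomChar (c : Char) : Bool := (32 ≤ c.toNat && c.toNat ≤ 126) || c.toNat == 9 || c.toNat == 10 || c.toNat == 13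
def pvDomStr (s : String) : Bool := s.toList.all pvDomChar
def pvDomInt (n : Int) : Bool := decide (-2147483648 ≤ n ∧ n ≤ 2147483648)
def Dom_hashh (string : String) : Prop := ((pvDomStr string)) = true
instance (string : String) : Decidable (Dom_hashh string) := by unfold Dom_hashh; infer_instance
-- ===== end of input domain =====

-- B replaces A's single-pass Horner multiply-and-add accumulator by two staged passes:
-- build the base-26 power table once, then zip it with the reversed substring and sum
-- the products (alternative decomposition, same cost).

-- ===== PORT A =====
-- try: return int(string); except: Horner loop over string[1:-1]
def hashh (string : String) : Int :=
  match PySem.Int.ofStr? string with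
  | some n => n
  | none =>
    let body := PySem.List.slice string.toList (some 1) (some (-1))
    let wholeHash := body.foldl (fun acc c => acc * 26 + ((c.toNat : Int) - 65 + 1)) 0
    wholeHash - 1

-- ===== PORT B =====
-- try: return int(string); except: pows = [1]; for _ in range(len(s)-1): pows.append(pows[-1]*26);
-- then sum(p * (ord(c) - 64) for p, c in zip(pows, reversed(s))) - 1
-- (pows is never empty, so pows[-1] = pyGet? pows (-1) is always some; the getD 0 default is unreachable)
def hashh_alt (string : String) : Int :=
  match PySem.Int.ofStr? string with
  | some n => n
  | none =>
    let s := PySem.List.slice string.toList (some 1) (some (-1))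
    let pows := (PySem.List.pyRange 0 ((s.length : Int) - 1) 1).foldl
      (fun ps _ => ps ++ [(PySem.List.pyGet? ps (-1)).getD 0 * 26]) [(1 : Int)]
    ((pows.zip s.reverse).map (fun q => q.1 * ((q.2.toNat : Int) - 64))).sum - 1

-- ===== PRECONDITION & SPEC =====
def Spec_hashh (string : String) (out : Int) : Prop := out = hashh_alt string
instance (string : String) (out : Int) : Decidable (Spec_hashh string out) := by unfold Spec_hashh; infer_instance

-- ===== CLAIM (what is proved, stated in full; the proofs are below) =====
def Claim_equal_hashh : Prop := ∀ (string : String), Dom_hashh string → Spec_hashh string (hashh string)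

-- ===== LEMMAS AND PROOFS =====

-- A's Horner fold started at a equals a shifted by 26^length plus the fold from 0
theorem hornerShift (t : List Char) (a : Int) :
    t.foldl (fun acc c => acc * 26 + ((c.toNat : Int) - 65 + 1)) a
      = a * 26 ^ t.length + t.foldl (fun acc c => acc * 26 + ((c.toNat : Int) - 65 + 1)) 0 := by
  induction t generalizing a with
  | nil => simp
  | cons c t ih =>
    simp only [List.foldl_cons, List.length_cons]
    rw [ih (a * 26 + ((c.toNat : Int) - 65 + 1)), ih (0 * 26 + ((c.toNat : Int) - 65 + 1))]
    ring

-- Python pows[-1] on a nonempty power table is its last power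
theorem lastPow (j : Nat) :
    (PySem.List.pyGet? ((List.range (j + 1)).map (fun i => (26 : Int) ^ i)) (-1)).getD 0
      = 26 ^ j := by
  simp [PySem.List.pyGet?, PySem.List.pyIdx?, List.getElem?_map]

-- B's power-table loop extends (range (j+1)).map (26^·) to (range (j+1+k)).map (26^·)
theorem buildPows (iter : List Int) (j : Nat) :
    iter.foldl (fun ps _ => ps ++ [(PySem.List.pyGet? ps (-1)).getD 0 * 26])
        ((List.range (j + 1)).map (fun i => (26 : Int) ^ i))
      = (List.range (j + 1 + iter.length)).map (fun i => (26 : Int) ^ i) := by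
  induction iter generalizing j with
  | nil => simp
  | cons x iter ih =>
    simp only [List.foldl_cons, List.length_cons]
    rw [lastPow j]
    have hstep : ((List.range (j + 1)).map (fun i => (26 : Int) ^ i)) ++ [(26 : Int) ^ j * 26]
        = (List.range (j + 1 + 1)).map (fun i => (26 : Int) ^ i) := by
      simp [List.range_succ, pow_succ]
    rw [hstep, ih (j + 1)]
    have harith : j + 1 + 1 + iter.length = j + 1 + (iter.length + 1) := by omega
    rw [harith]

-- the zip of the power table with the reversed list sums to A's Horner value
theorem zipSum (l : List Char) :
    ((((List.range l.length).map (fun i => (26 : Int) ^ i)).zip l.reverse).map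
        (fun q => q.1 * ((q.2.toNat : Int) - 64))).sum
      = l.foldl (fun acc c => acc * 26 + ((c.toNat : Int) - 65 + 1)) 0 := by
  induction l with
  | nil => simp
  | cons c l ih =>
    have hrev : (c :: l).reverse = l.reverse ++ [c] := by simp
    have hrange : List.range (c :: l).length = List.range l.length ++ [l.length] := by
      simp [List.range_succ]
    rw [hrev, hrange, List.map_append,
      List.zip_append (by simp), List.map_append, List.sum_append, ih]
    simp only [List.map_cons, List.map_nil, List.zip_cons_cons, List.zip_nil_left,
      List.sum_cons, List.sum_nil, List.foldl_cons]
    rw [hornerShift l (0 * 26 + ((c.toNat : Int) - 65 + 1))]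
    ring

-- ===== VERDICT (by name: the statement is the Claim_ definition above) =====
theorem hashh_spec : Claim_equal_hashh := by
  intro string _
  unfold Spec_hashh hashh hashh_alt
  cases PySem.Int.ofStr? string with
  | some n => rfl
  | none =>
    simp only []
    set s := PySem.List.slice string.toList (some 1) (some (-1)) with hs
    rcases Nat.eq_zero_or_pos s.length with h0 | hpos
    · have : s = [] := List.eq_nil_of_length_eq_zero h0
      simp [this, PySem.List.pyRange]
    · have hrange : (PySem.List.pyRange 0 ((s.length : Int) - 1) 1).length = s.length - 1 := by
        rw [PySem.List.length_pyRange_one]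
        omega
      have hinit : [(1 : Int)] = (List.range (0 + 1)).map (fun i => (26 : Int) ^ i) := by
        simp
      rw [hinit, buildPows, hrange]
      have : 0 + 1 + (s.length - 1) = s.length := by omega
      rw [this, zipSum]
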